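-- pv_equiv track=rewrite | github.com/JordiCarreraVentura/daily-coding-problem | Problem #418/Problem_418.by.some.other.guy.who.didnt.get.the.problem.py | get_bonuses
-- ===== SOURCE A (Python) =====
-- def get_segments(arr):
--     asc = arr[1] > arr[0]
--     prev = arr[0]
--     start = 0
--     segments = []
--     for i, num in enumerate(arr[1:]):
--         if (asc and num < prev) or (not asc and num > prev):
--             segments.append((asc, i - start + 1))
--             start = i + 1
--             asc = not asc
--
--         prev = num
--
--     segments.append((asc, len(arr) - start))
--
--     return segments
--
-- def get_bonuses(arr):
--     if not arr:
--         return []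
--     if len(arr) == 1:
--         return [1]
--
--     segments = get_segments(arr)
--     bonuses = list()
--     for segment in segments:
--         asc, length = segment
--         seg_bonuses = list(range(length))
--         if not asc:
--             seg_bonuses.reverse()
--         bonuses.extend(seg_bonuses)
--
--     bonuses = [x + 1 for x in bonuses]
--
--     return bonuses
-- ===== SOURCE B (Python) =====
-- def get_bonuses(arr):
--     if not arr:
--         return []
--     if len(arr) == 1:
--         return [1]
--     # forward pass: for every position, the direction of the run containing it
--     # (equal neighbours extend the run) and its 1-based rank within that run
--     info = [(arr[1] > arr[0], 1)]
--     for p, x in zip(arr, arr[1:]):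
--         asc, k = info[-1]
--         d = asc if x == p else x > p
--         info.append((d, k + 1 if d == asc else 1))
--     # backward pass: ascending positions take their forward rank; descending
--     # positions count up from the run's right end
--     out = []
--     nxt = None  # direction of the position to the right, None at the end
--     for asc, k in reversed(info):
--         if asc:
--             out.append(k)
--         elif nxt == asc:
--             out.append(out[-1] + 1)
--         else:
--             out.append(1)
--         nxt = asc
--     out.reverse()
--     return out
-- ===== Notes on version B (the rewrite author's own statement) =====
-- stated objective: alternative
-- what changed: B never builds A's segments table or expands range() runs: a forward sweep over adjacent pairs records each position's run direction and in-run rank, and a backward sweep assigns each bonus positionally (forward rank for ascending positions, counting up from the run's right end for descending ones).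
import Mathlib
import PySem

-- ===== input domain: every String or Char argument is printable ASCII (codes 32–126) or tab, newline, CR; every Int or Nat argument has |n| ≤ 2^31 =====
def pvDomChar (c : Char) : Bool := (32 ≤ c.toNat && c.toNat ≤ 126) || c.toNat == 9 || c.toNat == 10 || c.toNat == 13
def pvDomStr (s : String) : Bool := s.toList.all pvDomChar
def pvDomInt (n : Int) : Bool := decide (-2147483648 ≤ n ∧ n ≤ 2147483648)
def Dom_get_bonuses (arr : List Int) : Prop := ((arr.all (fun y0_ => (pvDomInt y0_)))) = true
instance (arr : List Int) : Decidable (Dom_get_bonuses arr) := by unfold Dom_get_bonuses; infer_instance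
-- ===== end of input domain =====

-- B replaces A's segments-table-then-expand pipeline by a forward sweep recording each
-- position's run direction and in-run rank plus a backward sweep assigning bonuses
-- positionally; return values proved equal on all inputs.

-- ===== PORT A =====
-- loop body of get_segments' for-loop, named so lemmas can speak about it
def stepA (s : Bool × Int × Int × List (Bool × Int)) (p : Int × Int) :
    Bool × Int × Int × List (Bool × Int) :=
  let asc := s.1; let prev := s.2.1; let start := s.2.2.1; let segments := s.2.2.2
  let i := p.1; let num := p.2
  if (asc && decide (num < prev)) || (!asc && decide (num > prev)) then
    (!asc, num, i + 1, segments ++ [(asc, i - start + 1)])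
  else
    (asc, num, start, segments)

-- helper: Python's get_segments (only reached by get_bonuses with len(arr) ≥ 2,
-- so the .getD 0 defaults for arr[0]/arr[1] are never taken on reachable inputs)
def get_segments (arr : List Int) : List (Bool × Int) :=
  let asc0 := decide (arr.getD 1 0 > arr.getD 0 0)
  let st := (PySem.List.enumerate (arr.drop 1) 0).foldl stepA (asc0, arr.getD 0 0, 0, [])
  st.2.2.2 ++ [(st.1, (arr.length : Int) - st.2.2.1)]

def get_bonuses (arr : List Int) : List Int :=
  if arr = [] then []
  else if arr.length = 1 then [1]
  else
    let segments := get_segments arr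
    let bonuses := segments.foldl
      (fun (acc : List Int) (seg : Bool × Int) =>
        let seg_bonuses := PySem.List.pyRange 0 seg.2 1
        let seg_bonuses := if !seg.1 then seg_bonuses.reverse else seg_bonuses
        acc ++ seg_bonuses) []
    bonuses.map (· + 1)

-- ===== PORT B =====
-- forward-loop body: reads info[-1], appends the pair for the next position
def stepF (info : List (Bool × Int)) (px : Int × Int) : List (Bool × Int) :=
  let last := info.getLastD (false, 0)   -- info[-1]; info is never empty
  let asc := last.1; let k := last.2
  let d := if px.2 = px.1 then asc else decide (px.2 > px.1)
  info ++ [(d, if d = asc then k + 1 else 1)]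

-- backward-loop body: state is (out, nxt); out[-1] only read when out ≠ []
def stepB (s : List Int × Option Bool) (ik : Bool × Int) : List Int × Option Bool :=
  let out := s.1; let nxt := s.2
  let b := if ik.1 then ik.2
           else if nxt = some ik.1 then out.getLastD 0 + 1
           else 1
  (out ++ [b], some ik.1)

def get_bonuses_alt (arr : List Int) : List Int :=
  if arr = [] then []
  else if arr.length = 1 then [1]
  else
    -- arr[1], arr[0] exist here (len ≥ 2), so the getD defaults are never taken
    let info := (arr.zip (arr.drop 1)).foldl stepF
      [(decide (arr.getD 1 0 > arr.getD 0 0), 1)]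
    let st := info.reverse.foldl stepB ([], none)
    st.1.reverse

-- ===== PRECONDITION & SPEC =====
def Spec_get_bonuses (arr : List Int) (out : List Int) : Prop := out = get_bonuses_alt arr
instance (arr : List Int) (out : List Int) : Decidable (Spec_get_bonuses arr out) := by unfold Spec_get_bonuses; infer_instance

-- ===== CLAIM (what is proved, stated in full; the proofs are below) =====
def Claim_equal_get_bonuses : Prop := ∀ (arr : List Int), Dom_get_bonuses arr → Spec_get_bonuses arr (get_bonuses arr)

-- ===== LEMMAS AND PROOFS =====

-- reference recursion: bonuses of prev :: rest, where prev is the k-th element of a run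
-- going in direction asc; ascending bonuses come from k, descending ones from the tail
def ref (k : Int) (asc : Bool) (prev : Int) : List Int → List Int
  | [] => [if asc then k else 1]
  | num :: rest =>
    let asc' := if num = prev then asc else decide (num > prev)
    let tail := ref (if asc' = asc then k + 1 else 1) asc' num rest
    (if asc then k else if asc' = asc then tail.headD 0 + 1 else 1) :: tail

-- what B's forward loop computes after the seed entry
def tfs (asc : Bool) (k : Int) (prev : Int) : List Int → List (Bool × Int)
  | [] => []
  | num :: rest =>
    let d := if num = prev then asc else decide (num > prev)
    let k' := if d = asc then k + 1 else 1
    (d, k') :: tfs d k' num rest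

-- adjacent pairs of prev :: l, i.e. zip (prev :: l) l
def adjPairs (prev : Int) : List Int → List (Int × Int)
  | [] => []
  | x :: r => (prev, x) :: adjPairs x r

-- bonuses A emits for one finished segment (already 1-based)
def emitSeg (seg : Bool × Int) : List Int :=
  if seg.1 then PySem.List.pyRange 1 (seg.2 + 1) 1 else PySem.List.pyRange seg.2 0 (-1)

-- A's per-segment expansion (before the final +1 map)
def expandSeg (seg : Bool × Int) : List Int :=
  if !seg.1 then (PySem.List.pyRange 0 seg.2 1).reverse else PySem.List.pyRange 0 seg.2 1

-- bonuses of the already-scanned prefix of the current run (positions before prev)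
def pref (asc : Bool) (k h : Int) : List Int :=
  if asc then PySem.List.pyRange 1 k 1 else PySem.List.pyRange (h + k - 1) h (-1)

lemma map_add_one_pyRange (L : Int) :
    (PySem.List.pyRange 0 L 1).map (· + 1) = PySem.List.pyRange 1 (L + 1) 1 := by
  simp [PySem.List.pyRange_one]
  intro a _
  omega

lemma emitSeg_eq (seg : Bool × Int) : (expandSeg seg).map (· + 1) = emitSeg seg := by
  rcases seg with ⟨asc, L⟩
  cases asc with
  | true => simp [expandSeg, emitSeg, map_add_one_pyRange]
  | false =>
    simp [expandSeg, emitSeg, PySem.List.pyRange_neg_one_eq_reverse, ← map_add_one_pyRange]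

lemma foldl_expand (segs : List (Bool × Int)) :
    ∀ (init : List Int),
    segs.foldl
      (fun (acc : List Int) (seg : Bool × Int) =>
        let seg_bonuses := PySem.List.pyRange 0 seg.2 1
        let seg_bonuses := if !seg.1 then seg_bonuses.reverse else seg_bonuses
        acc ++ seg_bonuses) init = init ++ segs.flatMap expandSeg := by
  induction segs with
  | nil => intro init; simp
  | cons s t ih =>
    intro init
    simp only [List.foldl_cons, List.flatMap_cons, ih]
    simp [expandSeg]

-- the countdown range absorbs its stop value on the right
lemma pyRange_down_append (a b : Int) (h : b ≤ a) :
    PySem.List.pyRange a b (-1) ++ [b] = PySem.List.pyRange a (b - 1) (-1) := by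
  rw [PySem.List.pyRange_neg_one_eq_reverse, PySem.List.pyRange_neg_one_eq_reverse]
  have : b - 1 + 1 = b := by omega
  rw [this, PySem.List.pyRange_one_cons (by omega : b < a + 1)]
  simp

-- closing the current run: its prefix bonuses plus the closing value give emitSeg
lemma pref_close (asc : Bool) (k : Int) (hk : 1 ≤ k) :
    pref asc k (if asc then k else 1) ++ [if asc then k else 1] = emitSeg (asc, k) := by
  cases asc with
  | true =>
    simp only [pref, emitSeg, if_true]
    rw [← PySem.List.pyRange_one_succ_right (by omega : (1:Int) ≤ k)]
  | false =>
    simp only [pref, emitSeg, if_false, Bool.false_eq_true]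
    rw [show (1:Int) + k - 1 = k by omega, pyRange_down_append k 1 (by omega)]
    norm_num

-- a run prefix of a single element contributes nothing yet
lemma pref_one (b : Bool) (h : Int) : pref b 1 h = [] := by
  cases b <;>
    simp [pref, PySem.List.pyRange_one_eq_nil, PySem.List.pyRange_neg_one_eq_nil]

-- A side: the fold over the remaining enumerate list, in terms of ref
lemma A_loop (rest : List Int) :
    ∀ (i0 start k : Int) (asc : Bool) (prev : Int) (segs : List (Bool × Int)),
    1 ≤ k → i0 = start + k - 1 →
    (let st := (PySem.List.enumerate rest i0).foldl stepA (asc, prev, start, segs)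
     (st.2.2.2 ++ [(st.1, (i0 + rest.length + 1) - st.2.2.1)]).flatMap emitSeg)
    = segs.flatMap emitSeg ++ pref asc k ((ref k asc prev rest).headD 0)
        ++ ref k asc prev rest := by
  induction rest with
  | nil =>
    intro i0 start k asc prev segs hk hi
    simp only [PySem.List.enumerate_nil, List.foldl_nil, List.flatMap_append, ref,
      List.headD_cons, List.flatMap_cons, List.flatMap_nil, List.append_nil, List.length_nil,
      Nat.cast_zero]
    have : i0 + (0:Int) + 1 - start = k := by omega
    rw [this, List.append_assoc, pref_close asc k hk]
  | cons num r ih =>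
    intro i0 start k asc prev segs hk hi
    rw [PySem.List.enumerate_cons]
    simp only [List.foldl_cons]
    have hcond : ((asc && decide (num < prev)) || (!asc && decide (num > prev)))
        = ((if num = prev then asc else decide (num > prev)) != asc) := by
      by_cases h : num = prev
      · subst h; cases asc <;> simp
      · rcases lt_trichotomy num prev with h1 | h1 | h1
        · cases asc <;>
            simp [h, h1, show ¬ (num > prev) from by omega]
        · exact absurd h1 h
        · cases asc <;>
            simp [h, h1, show ¬ (num < prev) from by omega]
    by_cases hd : (if num = prev then asc else decide (num > prev)) = asc
    · -- run continues
      have hc : ((asc && decide (num < prev)) || (!asc && decide (num > prev))) = false := by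
        rw [hcond, hd]; simp
      simp only [stepA, hc, Bool.false_eq_true, if_false]
      have := ih (i0 + 1) start (k + 1) asc num segs (by omega) (by omega)
      simp only at this
      rw [show (i0 + 1 + (r.length:Int) + 1) = (i0 + ((num :: r).length :Int) + 1) by
        simp; omega] at this
      rw [this]
      -- fold ref on the RHS
      simp only [ref, hd, if_true, List.headD_cons]
      cases asc with
      | true =>
        have hr : PySem.List.pyRange 1 (k + 1) 1 = PySem.List.pyRange 1 k 1 ++ [k] :=
          PySem.List.pyRange_one_succ_right (by omega)
        simp [pref, hr]
      | false =>
        set h' := (ref (k+1) false num r).headD 0 with hh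
        have hr2 : PySem.List.pyRange (h' + k) (h' + 1) (-1) ++ [h' + 1]
            = PySem.List.pyRange (h' + k) h' (-1) := by
          have := pyRange_down_append (h' + k) (h' + 1) (by omega)
          simpa using this
        simp only [Bool.false_eq_true, if_false, pref,
          show h' + 1 + k - 1 = h' + k from by omega,
          show h' + (k + 1) - 1 = h' + k from by omega, ← hr2]
        simp
    · -- reversal: current run is closed with length k
      have hc : ((asc && decide (num < prev)) || (!asc && decide (num > prev))) = true := by
        rw [hcond]; simp [hd]
      have hdval : (if num = prev then asc else decide (num > prev)) = !asc := by
        cases asc <;> simp_all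
      simp only [stepA, hc, if_true]
      have := ih (i0 + 1) (i0 + 1) 1 (!asc) num (segs ++ [(asc, i0 - start + 1)])
        (by omega) (by omega)
      simp only at this
      rw [show (i0 + 1 + (r.length:Int) + 1) = (i0 + ((num :: r).length :Int) + 1) by
        simp; omega] at this
      rw [this]
      simp only [List.flatMap_append, List.flatMap_cons, List.flatMap_nil, List.append_nil]
      have hlen : i0 - start + 1 = k := by omega
      rw [hlen]
      simp only [ref, List.headD_cons, hdval]
      rw [pref_one, List.append_nil, ← pref_close asc k hk]
      cases asc <;> simp

-- B side, forward loop: zip (prev :: l) l is adjPairs, and the fold appends tfs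
lemma zip_eq_adjPairs : ∀ (l : List Int) (prev : Int),
    (prev :: l).zip l = adjPairs prev l := by
  intro l
  induction l with
  | nil => intro prev; rfl
  | cons x r ih =>
    intro prev
    rw [List.zip_cons_cons, ih x]
    rfl

lemma fwd_loop (l : List Int) :
    ∀ (prev : Int) (asc : Bool) (k : Int) (pre : List (Bool × Int)),
    (adjPairs prev l).foldl stepF (pre ++ [(asc, k)])
      = pre ++ [(asc, k)] ++ tfs asc k prev l := by
  induction l with
  | nil => intro prev asc k pre; simp [adjPairs, tfs]
  | cons x r ih =>
    intro prev asc k pre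
    simp only [adjPairs, List.foldl_cons]
    have hlast : (pre ++ [(asc, k)]).getLastD (false, 0) = (asc, k) := by
      simp
    simp only [stepF, hlast]
    have := ih x (if x = prev then asc else decide (x > prev))
      (if (if x = prev then asc else decide (x > prev)) = asc then k + 1 else 1)
      (pre ++ [(asc, k)])
    rw [List.append_assoc (pre ++ [(asc,k)])] at this
    rw [this]
    simp [tfs]

-- B side, backward loop unwinds exactly ref, reversed
lemma bwd_loop (l : List Int) :
    ∀ (asc : Bool) (k : Int) (prev : Int),
    (((asc, k) :: tfs asc k prev l).reverse).foldl stepB ([], none)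
      = ((ref k asc prev l).reverse, some asc) := by
  induction l with
  | nil =>
    intro asc k prev
    simp only [tfs, List.reverse_cons, List.reverse_nil, List.nil_append, List.foldl_cons,
      List.foldl_nil, stepB, ref]
    cases asc <;> simp
  | cons num r ih =>
    intro asc k prev
    simp only [tfs, ref]
    set d := (if num = prev then asc else decide (num > prev)) with hd
    set k' := (if d = asc then k + 1 else 1) with hk'
    have hrs : ((asc, k) :: (d, k') :: tfs d k' num r).reverse
        = ((d, k') :: tfs d k' num r).reverse ++ [(asc, k)] := by simp
    rw [hrs, List.foldl_append, ih d k' num]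
    simp only [stepB, List.foldl_cons]
    cases asc with
    | true => simp
    | false =>
      by_cases hde : d = false
      · simp [hde]
      · have : d = true := by revert hde; cases d <;> simp
        simp [this]

-- glue on each side
lemma A_eq_ref (a0 a1 : Int) (rest : List Int) :
    get_bonuses (a0 :: a1 :: rest)
      = ref 1 (decide (a1 > a0)) a0 (a1 :: rest) := by
  unfold get_bonuses get_segments
  rw [if_neg (by simp : ¬ (a0 :: a1 :: rest) = []),
    if_neg (by simp : ¬ (a0 :: a1 :: rest).length = 1)]
  dsimp only
  rw [foldl_expand]
  simp only [List.nil_append, List.map_flatMap]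
  have hmap : ∀ segs : List (Bool × Int),
      segs.flatMap (fun s => (expandSeg s).map (· + 1)) = segs.flatMap emitSeg := by
    intro segs; congr 1; funext s; exact emitSeg_eq s
  rw [hmap]
  simp only [List.drop_succ_cons, List.drop_zero, List.getD_cons_zero, List.getD_cons_succ]
  rw [show ((a0 :: a1 :: rest).length : Int) = 0 + ((a1 :: rest).length : Int) + 1 by simp]
  have := A_loop (a1 :: rest) 0 0 1 (decide (a1 > a0)) a0 [] (by omega) (by omega)
  simp only [List.flatMap_nil, List.nil_append] at this
  rw [pref_one, List.nil_append] at this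
  exact this

lemma B_eq_ref (a0 a1 : Int) (rest : List Int) :
    get_bonuses_alt (a0 :: a1 :: rest)
      = ref 1 (decide (a1 > a0)) a0 (a1 :: rest) := by
  unfold get_bonuses_alt
  have hlen : ¬ (a0 :: a1 :: rest).length = 1 := by simp
  simp only [reduceCtorEq, if_false, hlen, List.getD_cons_zero, List.getD_cons_succ]
  have hzip : (a0 :: a1 :: rest).zip ((a0 :: a1 :: rest).drop 1)
      = adjPairs a0 (a1 :: rest) := by
    simp only [List.drop_succ_cons, List.drop_zero]
    exact zip_eq_adjPairs (a1 :: rest) a0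
  rw [hzip]
  have hf := fwd_loop (a1 :: rest) a0 (decide (a1 > a0)) 1 []
  simp only [List.nil_append] at hf
  rw [hf]
  rw [show ([(decide (a1 > a0), 1)] ++ tfs (decide (a1 > a0)) 1 a0 (a1 :: rest))
      = ((decide (a1 > a0), 1) :: tfs (decide (a1 > a0)) 1 a0 (a1 :: rest)) from rfl]
  rw [bwd_loop (a1 :: rest) (decide (a1 > a0)) 1 a0]
  simp

-- ===== VERDICT (by name: the statement is the Claim_ definition above) =====
theorem get_bonuses_spec : Claim_equal_get_bonuses := by
  intro arr _
  unfold Spec_get_bonuses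
  match arr with
  | [] => rfl
  | [x] => rfl
  | a0 :: a1 :: rest => rw [A_eq_ref, B_eq_ref]
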